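-- pv_equiv track=rewrite | github.com/EthannyDing/Name-Entity-Recognition | Test_code.py | form_subquery
-- ===== SOURCE A (Python) =====
-- def form_subquery(tokens):
--
--     period_ind = [i for i, token in enumerate(tokens) if token=='.']
--     comma_ind = [i for i, token in enumerate(tokens) if token==',']
--     period_ind.extend(comma_ind)
--     breaks = sorted(period_ind)
--     sub_queries = [" ".join(tokens[i : j]).replace('.','').replace(',','').strip()
--                    for i, j in zip([0] + breaks, breaks + [None])]
--     if '' in sub_queries:
--         sub_queries.remove("")
--     return sub_queries
-- ===== SOURCE B (Python) =====
-- def form_subquery(tokens):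
--     def clean(seg):
--         return " ".join(seg).replace('.', '').replace(',', '').strip()
--
--     sub_queries = []
--     current = []
--     for token in tokens:
--         if token == '.' or token == ',':
--             sub_queries.append(clean(current))
--             current = []
--         else:
--             current.append(token)
--     sub_queries.append(clean(current))
--     if '' in sub_queries:
--         sub_queries.remove('')
--     return sub_queries
-- ===== Notes on version B (the rewrite author's own statement) =====
-- stated objective: simpler
-- what changed: One accumulating pass that flushes the current segment at each '.'/',' token, replacing A's two enumerate scans, index-list sort and zip-of-slices.
import Mathlib
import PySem

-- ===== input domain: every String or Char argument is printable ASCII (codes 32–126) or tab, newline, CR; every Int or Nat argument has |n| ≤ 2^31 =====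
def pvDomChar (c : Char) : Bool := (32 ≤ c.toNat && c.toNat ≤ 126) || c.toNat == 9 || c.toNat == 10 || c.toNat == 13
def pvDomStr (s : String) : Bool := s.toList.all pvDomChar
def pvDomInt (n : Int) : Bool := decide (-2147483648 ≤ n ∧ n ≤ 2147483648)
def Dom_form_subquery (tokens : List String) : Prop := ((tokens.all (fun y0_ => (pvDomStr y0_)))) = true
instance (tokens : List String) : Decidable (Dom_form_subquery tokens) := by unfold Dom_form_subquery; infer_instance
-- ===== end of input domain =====

-- B replaces A's two enumerate scans, index sort and zip-of-slices by one accumulating pass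
-- that flushes the current segment at each '.'/',' token (objective: simpler; same asymptotic cost).

-- ===== PORT A =====
def form_subquery (tokens : List String) : List String :=
  let period_ind := ((PySem.List.enumerate tokens).filter (fun p => p.2 == ".")).map (fun p => p.1)
  let comma_ind := ((PySem.List.enumerate tokens).filter (fun p => p.2 == ",")).map (fun p => p.1)
  let ext := period_ind ++ comma_ind
  let breaks := PySem.List.sorted ext (fun x => x)
  let sub_queries := (((0 : Int) :: breaks).zip (breaks.map some ++ [none])).map
      (fun ij => PySem.Str.strip (PySem.Str.replace (PySem.Str.replace
        (PySem.Str.join " " (PySem.List.slice tokens (some ij.1) ij.2)) "." "") "," ""))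
  if "" ∈ sub_queries then (PySem.List.remove? sub_queries "").getD sub_queries else sub_queries

-- ===== PORT B =====
def pvClean (seg : List String) : String :=
  PySem.Str.strip (PySem.Str.replace (PySem.Str.replace (PySem.Str.join " " seg) "." "") "," "")

def form_subquery_alt (tokens : List String) : List String :=
  let st := tokens.foldl
    (fun (st : List String × List String) token =>
      if token == "." || token == "," then (st.1 ++ [pvClean st.2], ([] : List String))
      else (st.1, st.2 ++ [token]))
    ([], [])
  let sub_queries := st.1 ++ [pvClean st.2]
  if "" ∈ sub_queries then (PySem.List.remove? sub_queries "").getD sub_queries else sub_queries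

-- ===== PRECONDITION & SPEC =====
def Spec_form_subquery (tokens : List String) (out : List String) : Prop := out = form_subquery_alt tokens
instance (tokens : List String) (out : List String) : Decidable (Spec_form_subquery tokens out) := by unfold Spec_form_subquery; infer_instance

-- ===== CLAIM (what is proved, stated in full; the proofs are below) =====
def Claim_equal_form_subquery : Prop := ∀ (tokens : List String), Dom_form_subquery tokens → Spec_form_subquery tokens (form_subquery tokens)

-- ===== LEMMAS AND PROOFS =====

def pvSep (t : String) : Bool := t == "." || t == ","

def pvConsHead (t : String) : List (List String) → List (List String)
  | [] => [[t]]
  | s :: r => (t :: s) :: r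

-- segments as A slices them: each segment after the first begins with its separator token
def pvSegsA : List String → List (List String)
  | [] => [[]]
  | t :: ts => if pvSep t then [] :: pvConsHead t (pvSegsA ts) else pvConsHead t (pvSegsA ts)

-- segments as B accumulates them: separators are dropped
def pvSegsB : List String → List (List String)
  | [] => [[]]
  | t :: ts => if pvSep t then [] :: pvSegsB ts else pvConsHead t (pvSegsB ts)

def pvPairsOf {α : Type} (x : α) : List α → List (α × Option α)
  | [] => [(x, none)]
  | b :: bs => (x, some b) :: pvPairsOf b bs

def pvSliceF (ts : List String) (p : Nat × Option Nat) : List String :=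
  match p.2 with
  | none => ts.drop p.1
  | some j => (ts.drop p.1).take (j - p.1)

def pvBsN : List String → Nat → List Nat
  | [], _ => []
  | t :: ts, s => if pvSep t then s :: pvBsN ts (s + 1) else pvBsN ts (s + 1)

theorem pvSegsB_ne_nil (ts : List String) : pvSegsB ts ≠ [] := by
  cases ts with
  | nil => simp [pvSegsB]
  | cons t ts =>
    simp only [pvSegsB]
    split <;> [simp; skip]
    cases h : pvSegsB ts <;> simp [pvConsHead]

theorem pvZip_pairsOf {α : Type} (x : α) (bs : List α) :
    (x :: bs).zip (bs.map some ++ [none]) = pvPairsOf x bs := by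
  induction bs generalizing x with
  | nil => simp [pvPairsOf]
  | cons b bs ih => simp [pvPairsOf, ← ih b]

theorem pvPairsOf_cast (n : Nat) (bs : List Nat) :
    pvPairsOf ((n : Int)) (bs.map (fun (k : Nat) => (k : Int)))
      = (pvPairsOf n bs).map (fun p => ((p.1 : Int), p.2.map (fun j => (j : Int)))) := by
  induction bs generalizing n with
  | nil => simp [pvPairsOf]
  | cons b bs ih =>
    simp only [List.map_cons, pvPairsOf]
    rw [ih b]
    simp

theorem pvSliceF_shift_aux (t : String) (ts : List String) (b : Nat) (bs : List Nat) :
    (pvPairsOf (b + 1) (bs.map (· + 1))).map (pvSliceF (t :: ts))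
      = (pvPairsOf b bs).map (pvSliceF ts) := by
  induction bs generalizing b with
  | nil => simp [pvPairsOf, pvSliceF]
  | cons c cs ih =>
    simp only [List.map_cons, pvPairsOf, List.map]
    refine congrArg₂ _ ?_ (ih c)
    simp [pvSliceF, Nat.succ_sub_succ]

theorem pvSliceF_shift (t : String) (ts : List String) (bs : List Nat) :
    (pvPairsOf 0 (bs.map (· + 1))).map (pvSliceF (t :: ts))
      = pvConsHead t ((pvPairsOf 0 bs).map (pvSliceF ts)) := by
  cases bs with
  | nil => simp [pvPairsOf, pvSliceF, pvConsHead]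
  | cons b bs =>
    simp only [List.map_cons, pvPairsOf, List.map, pvConsHead]
    refine congrArg₂ _ ?_ ?_
    · simp [pvSliceF, List.take_succ_cons]
    · have := pvSliceF_shift_aux t ts b bs
      simpa using this

theorem pvBsN_succ (ts : List String) : ∀ s, pvBsN ts (s + 1) = (pvBsN ts s).map (· + 1) := by
  induction ts with
  | nil => simp [pvBsN]
  | cons t ts ih =>
    intro s
    simp only [pvBsN]
    split <;> simp [ih (s + 1)]

theorem pvSlices_eq_segsA (ts : List String) :
    (pvPairsOf 0 (pvBsN ts 0)).map (pvSliceF ts) = pvSegsA ts := by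
  induction ts with
  | nil => simp [pvPairsOf, pvBsN, pvSliceF, pvSegsA]
  | cons t ts ih =>
    simp only [pvBsN, pvSegsA]
    by_cases h : pvSep t
    · rw [if_pos h, if_pos h]
      rw [show (0 : Nat) + 1 = 1 from rfl, show pvBsN ts 1 = pvBsN ts (0 + 1) from rfl,
        pvBsN_succ ts 0]
      simp only [pvPairsOf, List.map_cons]
      rw [pvSliceF_shift t ts (pvBsN ts 0), ih]
      simp [pvSliceF]
    · rw [if_neg h, if_neg h]
      rw [show pvBsN ts 1 = pvBsN ts (0 + 1) from rfl, pvBsN_succ ts 0,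
        pvSliceF_shift t ts (pvBsN ts 0), ih]

theorem pvSepIdx_eq (ts : List String) :
    ∀ s : Nat, ((PySem.List.enumerate ts (s : Int)).filter (fun p => pvSep p.2)).map (fun p => p.1)
      = (pvBsN ts s).map (fun (n : Nat) => (n : Int)) := by
  induction ts with
  | nil => intro s; simp [PySem.List.enumerate, pvBsN]
  | cons t ts ih =>
    intro s
    rw [PySem.List.enumerate_cons]
    by_cases h : pvSep t
    · have : ((s : Int), t) :: PySem.List.enumerate ts ((s : Int) + 1)
          = ((s : Int), t) :: PySem.List.enumerate ts (((s + 1 : Nat) : Int)) := by push_cast; ring_nf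
      rw [this]
      simp only [List.filter_cons, h, if_true, List.map_cons, pvBsN]
      rw [ih (s + 1)]
    · have : ((s : Int), t) :: PySem.List.enumerate ts ((s : Int) + 1)
          = ((s : Int), t) :: PySem.List.enumerate ts (((s + 1 : Nat) : Int)) := by push_cast; ring_nf
      rw [this]
      simp only [List.filter_cons, h, Bool.false_eq_true, if_false, pvBsN]
      rw [ih (s + 1)]

theorem pvFilter_or_perm {α : Type} (l : List α) (p q : α → Bool)
    (hdisj : ∀ x, ¬(p x = true ∧ q x = true)) :
    (l.filter (fun x => p x || q x)).Perm (l.filter p ++ l.filter q) := by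
  induction l with
  | nil => simp
  | cons x l ih =>
    by_cases hp : p x = true
    · have hq : q x = false := by
        by_cases hqt : q x = true
        · exact absurd ⟨hp, hqt⟩ (hdisj x)
        · simpa using hqt
      simp only [List.filter_cons, hp, hq, Bool.true_or, if_true]
      simpa using ih.cons x
    · have hp' : p x = false := by simpa using hp
      by_cases hq : q x = true
      · simp only [List.filter_cons, hp', hq, Bool.false_or, if_true]
        refine ((ih.cons x).trans ?_)
        simpa using List.perm_middle.symm
      · have hq' : q x = false := by simpa using hq
        simp only [List.filter_cons, hp', hq', Bool.false_or, Bool.false_eq_true, if_false]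
        exact ih

theorem pvBreaks_eq (ts : List String) :
    PySem.List.sorted
        ((((PySem.List.enumerate ts).filter (fun p => p.2 == ".")).map (fun p => p.1))
          ++ (((PySem.List.enumerate ts).filter (fun p => p.2 == ",")).map (fun p => p.1)))
        (fun x => x)
      = (pvBsN ts 0).map (fun (n : Nat) => (n : Int)) := by
  apply PySem.List.sorted_eq_of_perm_of_pairwise_lt
  · rw [← pvSepIdx_eq ts 0]
    show (((PySem.List.enumerate ts (((0 : Nat) : Int))).filter (fun p => pvSep p.2)).map (fun p => p.1)).Perm _
    rw [show (((0 : Nat)) : Int) = (0 : Int) from rfl]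
    rw [← List.map_append]
    apply List.Perm.map
    exact pvFilter_or_perm _ _ _ (by
      intro x ⟨h1, h2⟩
      have e1 : x.2 = "." := by simpa using h1
      have e2 : x.2 = "," := by simpa using h2
      rw [e1] at e2; exact absurd e2 (by decide))
  · rw [← pvSepIdx_eq ts 0]
    exact List.Pairwise.map _ (fun a b h => h) ((PySem.List.pairwise_lt_enumerate ts 0).filter _)

-- A's list of subqueries equals pvClean mapped over A's segments
theorem pvA_subqueries (ts : List String) :
    (((0 : Int) :: PySem.List.sorted
          ((((PySem.List.enumerate ts).filter (fun p => p.2 == ".")).map (fun p => p.1))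
            ++ (((PySem.List.enumerate ts).filter (fun p => p.2 == ",")).map (fun p => p.1)))
          (fun x => x)).zip
        ((PySem.List.sorted
          ((((PySem.List.enumerate ts).filter (fun p => p.2 == ".")).map (fun p => p.1))
            ++ (((PySem.List.enumerate ts).filter (fun p => p.2 == ",")).map (fun p => p.1)))
          (fun x => x)).map some ++ [none])).map
        (fun ij => PySem.Str.strip (PySem.Str.replace (PySem.Str.replace
          (PySem.Str.join " " (PySem.List.slice ts (some ij.1) ij.2)) "." "") "," ""))
      = (pvSegsA ts).map pvClean := by
  rw [pvBreaks_eq, pvZip_pairsOf]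
  rw [show (0 : Int) = ((0 : Nat) : Int) from rfl, pvPairsOf_cast, List.map_map]
  rw [← pvSlices_eq_segsA ts, List.map_map]
  apply List.map_congr_left
  intro p _
  cases p with
  | mk i j =>
    cases j with
    | none => simp [pvClean, pvSliceF, PySem.List.slice_from_natCast]
    | some j => simp [pvClean, pvSliceF, PySem.List.slice_natCast]

def pvPrepend (cur : List String) : List (List String) → List (List String)
  | [] => [cur]
  | s :: r => (cur ++ s) :: r

theorem pvFoldB (ts : List String) :
    ∀ (acc : List String) (cur : List String),
      (ts.foldl (fun (st : List String × List String) token =>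
          if token == "." || token == "," then (st.1 ++ [pvClean st.2], ([] : List String))
          else (st.1, st.2 ++ [token])) (acc, cur)).1
        ++ [pvClean (ts.foldl (fun (st : List String × List String) token =>
          if token == "." || token == "," then (st.1 ++ [pvClean st.2], ([] : List String))
          else (st.1, st.2 ++ [token])) (acc, cur)).2]
      = acc ++ (pvPrepend cur (pvSegsB ts)).map pvClean := by
  induction ts with
  | nil => intro acc cur; simp [pvPrepend, pvSegsB]
  | cons t ts ih =>
    intro acc cur
    simp only [List.foldl_cons]
    by_cases h : pvSep t
    · have h' : (t == "." || t == ",") = true := h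
      simp only [h', if_true]
      rw [ih (acc ++ [pvClean cur]) []]
      simp only [pvSegsB, h, if_true]
      obtain ⟨s, r, hsr⟩ : ∃ s r, pvSegsB ts = s :: r := by
        cases hh : pvSegsB ts with
        | nil => exact absurd hh (pvSegsB_ne_nil ts)
        | cons s r => exact ⟨s, r, rfl⟩
      rw [hsr]
      simp [pvPrepend]
    · have h' : (t == "." || t == ",") = false := by simpa [pvSep] using h
      simp only [h', Bool.false_eq_true, if_false]
      rw [ih acc (cur ++ [t])]
      simp only [pvSegsB, h]
      obtain ⟨s, r, hsr⟩ : ∃ s r, pvSegsB ts = s :: r := by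
        cases hh : pvSegsB ts with
        | nil => exact absurd hh (pvSegsB_ne_nil ts)
        | cons s r => exact ⟨s, r, rfl⟩
      rw [hsr]
      simp [pvPrepend, pvConsHead]

-- replace(s, c, '') removes every occurrence of the single character c
theorem pvReplace_go_filter (c : Char) :
    ∀ (l : List Char) (acc : List Char),
      PySem.Chars.replace.go [c] [] l.length l acc = acc.reverse ++ l.filter (fun x => !(x == c)) := by
  intro l
  induction l with
  | nil => intro acc; simp [PySem.Chars.replace.go]
  | cons x t ih =>
    intro acc
    show PySem.Chars.replace.go [c] [] (t.length + 1) (x :: t) acc = _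
    rw [PySem.Chars.replace.go]
    by_cases h : x = c
    · subst h
      simp only [List.isPrefixOf, BEq.rfl, Bool.true_and, if_true]
      simp only [List.length_cons, List.drop_succ_cons, List.length_nil, List.drop_zero,
        List.reverse_nil, List.nil_append]
      rw [ih acc]
      simp
    · have h' : ([c].isPrefixOf (x :: t)) = false := by
        simp [List.isPrefixOf]
        exact fun hc => absurd hc.symm h
      rw [if_neg (by simp [h'])]
      rw [ih (x :: acc)]
      simp [h]

theorem pvReplace_filter (cs : List Char) (c : Char) :
    PySem.Chars.replace cs [c] [] = cs.filter (fun x => !(x == c)) := by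
  rw [PySem.Chars.replace]
  simp only [List.isEmpty_cons]
  exact pvReplace_go_filter c cs []

theorem pvStrip_space (y : List Char) : PySem.Chars.strip (' ' :: y) = PySem.Chars.strip y := by
  simp [PySem.Chars.strip, PySem.Chars.lstrip, PySem.Chars.isspace]

theorem pvClean_cons_sep (c : String) (b : List String) (h : pvSep c = true) :
    pvClean (c :: b) = pvClean b := by
  have hc : c = "." ∨ c = "," := by
    rcases Bool.or_eq_true_iff.mp h with h1 | h1
    · exact Or.inl (by simpa using h1)
    · exact Or.inr (by simpa using h1)
  cases b with
  | nil =>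
    rcases hc with rfl | rfl <;> decide
  | cons b0 bs =>
    apply String.toList_inj.mp
    simp only [pvClean, PySem.Str.toList_strip, PySem.Str.toList_replace, PySem.Str.toList_join]
    rw [show ("." : String).toList = ['.'] from rfl, show ("," : String).toList = [','] from rfl,
      show ("" : String).toList = [] from rfl, show (" " : String).toList = [' '] from rfl]
    rw [pvReplace_filter, pvReplace_filter, pvReplace_filter, pvReplace_filter]
    rcases hc with rfl | rfl
    · simp only [List.map_cons]
      conv_lhs => rw [show ("." : String).toList = ['.'] from rfl, PySem.Chars.join_cons_cons]
      simp only [List.filter_append, List.filter_cons]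
      norm_num
      simp
      rw [pvStrip_space]
    · simp only [List.map_cons]
      conv_lhs => rw [show ("," : String).toList = [','] from rfl, PySem.Chars.join_cons_cons]
      simp only [List.filter_append, List.filter_cons]
      norm_num
      simp
      rw [pvStrip_space]

theorem pvSegs_rel (ts : List String) :
    ∃ s ta tb, pvSegsA ts = s :: ta ∧ pvSegsB ts = s :: tb ∧
      List.Forall₂ (fun a b => ∃ c, pvSep c = true ∧ a = c :: b) ta tb := by
  induction ts with
  | nil => exact ⟨[], [], [], rfl, rfl, List.Forall₂.nil⟩
  | cons t ts ih =>
    obtain ⟨s, ta, tb, hA, hB, hF⟩ := ih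
    by_cases h : pvSep t
    · refine ⟨[], (t :: s) :: ta, s :: tb, ?_, ?_, ?_⟩
      · simp [pvSegsA, h, hA, pvConsHead]
      · simp [pvSegsB, h, hB]
      · exact List.Forall₂.cons ⟨t, h, rfl⟩ hF
    · refine ⟨t :: s, ta, tb, ?_, ?_, hF⟩
      · simp [pvSegsA, h, hA, pvConsHead]
      · simp [pvSegsB, h, hB, pvConsHead]

theorem pvMap_eq_of_forall2 (ta tb : List (List String))
    (hF : List.Forall₂ (fun a b => ∃ c, pvSep c = true ∧ a = c :: b) ta tb) :
    ta.map pvClean = tb.map pvClean := by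
  induction hF with
  | nil => rfl
  | cons hab _ ih =>
    obtain ⟨c, hc, rfl⟩ := hab
    simp only [List.map_cons, ih, pvClean_cons_sep c _ hc]

theorem pvMap_segs_eq (ts : List String) :
    (pvSegsA ts).map pvClean = (pvSegsB ts).map pvClean := by
  obtain ⟨s, ta, tb, hA, hB, hF⟩ := pvSegs_rel ts
  rw [hA, hB]
  simp only [List.map_cons]
  rw [pvMap_eq_of_forall2 ta tb hF]

-- ===== VERDICT (by name: the statement is the Claim_ definition above) =====
theorem form_subquery_spec : Claim_equal_form_subquery := by
  intro tokens _
  show form_subquery tokens = form_subquery_alt tokens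
  simp only [form_subquery, form_subquery_alt]
  rw [pvA_subqueries tokens]
  rw [pvMap_segs_eq tokens]
  have hB := pvFoldB tokens [] []
  obtain ⟨s, r, hsr⟩ : ∃ s r, pvSegsB tokens = s :: r := by
    cases hh : pvSegsB tokens with
    | nil => exact absurd hh (pvSegsB_ne_nil tokens)
    | cons s r => exact ⟨s, r, rfl⟩
  rw [hsr] at hB ⊢
  simp only [pvPrepend, List.nil_append] at hB
  rw [← hB]
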